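-- pv_equiv track=rewrite | github.com/buzziologia/GeoValida | frontend/frontend/amcharts_generator.py | build_legend_html
-- ===== SOURCE A (Python) =====
-- COLOR_MAP: dict[int, str] = {
--     0: "#CCCCCC",
--     1: "#2D6A4F",
--     2: "#52B788",
--     3: "#95D5B2",
--     4: "#FFCF00",
--     5: "#FF8C00",
--     6: "#E63946",
--     7: "#6A0DAD",
-- }
--
-- COLOR_LABELS: dict[int, str] = {
--     1: "Nível 1 (Capital)",
--     2: "Nível 2",
--     3: "Nível 3",
--     4: "Nível 4",
--     5: "Nível 5",
--     6: "Nível 6",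
--     7: "Nível 7 (Menor)",
-- }
--
-- def build_legend_html(active_colors: set[int]) -> str:
--     items = sorted(
--         [(cid, COLOR_MAP[cid], COLOR_LABELS[cid])
--          for cid in active_colors if cid in COLOR_LABELS],
--         key=lambda x: x[0],
--     )
--     if not items:
--         return ""
--
--     rows = "".join(
--         f'<div style="display:flex;align-items:center;gap:8px;margin:3px 0">'
--         f'<div style="width:13px;height:13px;border-radius:3px;background:{color};'
--         f'flex-shrink:0;border:1px solid rgba(0,0,0,0.12)"></div>'
--         f'<span style="font-size:11px;color:#444">{label}</span></div>'
--         for _, color, label in items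
--     )
--     return (
--         '<div id="legend" style="position:absolute;bottom:12px;right:12px;'
--         'background:rgba(255,255,255,0.96);backdrop-filter:blur(8px);'
--         'border-radius:8px;padding:10px 12px;box-shadow:0 2px 12px rgba(0,0,0,0.12);'
--         'font-family:\'Segoe UI\',system-ui,sans-serif;z-index:100;min-width:155px;">'
--         '<div style="font-size:10px;font-weight:700;color:#071D41;margin-bottom:6px;'
--         'text-transform:uppercase;letter-spacing:0.6px">Legenda UTP</div>'
--         f'{rows}</div>'
--     )
-- ===== SOURCE B (Python) =====
-- COLOR_MAP: dict[int, str] = {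
--     0: "#CCCCCC",
--     1: "#2D6A4F",
--     2: "#52B788",
--     3: "#95D5B2",
--     4: "#FFCF00",
--     5: "#FF8C00",
--     6: "#E63946",
--     7: "#6A0DAD",
-- }
--
-- COLOR_LABELS: dict[int, str] = {
--     1: "Nível 1 (Capital)",
--     2: "Nível 2",
--     3: "Nível 3",
--     4: "Nível 4",
--     5: "Nível 5",
--     6: "Nível 6",
--     7: "Nível 7 (Menor)",
-- }
--
-- # Row strings are rendered once at module load; the function itself only
-- # accumulates a 7-bit mask and concatenates precomputed rows by bit.
-- _ROWS: dict[int, str] = {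
--     cid: (
--         f'<div style="display:flex;align-items:center;gap:8px;margin:3px 0">'
--         f'<div style="width:13px;height:13px;border-radius:3px;background:{COLOR_MAP[cid]};'
--         f'flex-shrink:0;border:1px solid rgba(0,0,0,0.12)"></div>'
--         f'<span style="font-size:11px;color:#444">{label}</span></div>'
--     )
--     for cid, label in COLOR_LABELS.items()
-- }
--
-- _HEADER = (
--     '<div id="legend" style="position:absolute;bottom:12px;right:12px;'
--     'background:rgba(255,255,255,0.96);backdrop-filter:blur(8px);'
--     'border-radius:8px;padding:10px 12px;box-shadow:0 2px 12px rgba(0,0,0,0.12);'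
--     'font-family:\'Segoe UI\',system-ui,sans-serif;z-index:100;min-width:155px;">'
--     '<div style="font-size:10px;font-weight:700;color:#071D41;margin-bottom:6px;'
--     'text-transform:uppercase;letter-spacing:0.6px">Legenda UTP</div>'
-- )
--
--
-- def build_legend_html(active_colors: set[int]) -> str:
--     mask = 0
--     for c in active_colors:
--         if 1 <= c <= 7:
--             mask |= 1 << c
--     if mask == 0:
--         return ""
--     body = "".join(_ROWS[i] for i in range(1, 8) if mask >> i & 1)
--     return _HEADER + body + "</div>"
-- ===== Notes on version B (the rewrite author's own statement) =====
-- stated objective: alternative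
-- what changed: B renders the seven row strings once at module load and the function only accumulates a 7-bit membership mask over the input with bitwise OR, then concatenates the precomputed rows whose bit is set; A collects (id,color,label) triples from the set, sorts them, and formats each row per call.
import Mathlib
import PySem

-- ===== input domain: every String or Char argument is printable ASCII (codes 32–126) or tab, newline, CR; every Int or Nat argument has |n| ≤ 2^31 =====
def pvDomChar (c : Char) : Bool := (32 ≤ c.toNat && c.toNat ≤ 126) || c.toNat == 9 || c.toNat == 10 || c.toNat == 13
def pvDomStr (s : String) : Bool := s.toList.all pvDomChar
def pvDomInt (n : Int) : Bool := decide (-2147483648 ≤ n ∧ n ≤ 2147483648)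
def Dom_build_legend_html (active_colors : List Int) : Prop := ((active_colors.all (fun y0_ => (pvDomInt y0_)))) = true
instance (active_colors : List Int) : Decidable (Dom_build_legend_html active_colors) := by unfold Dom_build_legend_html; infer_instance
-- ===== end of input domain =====

-- B replaces A's collect-sort-format pass by a 7-bit mask accumulated over the input
-- with bitwise OR, concatenating row strings precomputed at module load (objective: alternative).

-- ===== PORT A =====
def pvColorMap : PySem.Dict Int String := PySem.Dict.ofList
  [(0, "#CCCCCC"), (1, "#2D6A4F"), (2, "#52B788"), (3, "#95D5B2"),
   (4, "#FFCF00"), (5, "#FF8C00"), (6, "#E63946"), (7, "#6A0DAD")]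

def pvColorLabels : PySem.Dict Int String := PySem.Dict.ofList
  [(1, "Nível 1 (Capital)"), (2, "Nível 2"), (3, "Nível 3"), (4, "Nível 4"),
   (5, "Nível 5"), (6, "Nível 6"), (7, "Nível 7 (Menor)")]

def pvRow (color label : String) : String :=
  "<div style=\"display:flex;align-items:center;gap:8px;margin:3px 0\"" ++
  "><div style=\"width:13px;height:13px;border-radius:3px;background:" ++ color ++
  ";flex-shrink:0;border:1px solid rgba(0,0,0,0.12)\"></div>" ++
  "<span style=\"font-size:11px;color:#444\">" ++ label ++ "</span></div>"

def pvHeader : String :=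
  "<div id=\"legend\" style=\"position:absolute;bottom:12px;right:12px;" ++
  "background:rgba(255,255,255,0.96);backdrop-filter:blur(8px);" ++
  "border-radius:8px;padding:10px 12px;box-shadow:0 2px 12px rgba(0,0,0,0.12);" ++
  "font-family:'Segoe UI',system-ui,sans-serif;z-index:100;min-width:155px;\">" ++
  "<div style=\"font-size:10px;font-weight:700;color:#071D41;margin-bottom:6px;" ++
  "text-transform:uppercase;letter-spacing:0.6px\">Legenda UTP</div>"

-- COLOR_MAP[cid] / COLOR_LABELS[cid] are ported as getD with default "": the comprehension's
-- guard 'cid in COLOR_LABELS' makes both lookups succeed, so the default is never produced.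
def build_legend_html (active_colors : List Int) : String :=
  let items := PySem.List.sorted
    ((active_colors.filter (fun cid => pvColorLabels.contains cid)).map
      (fun cid => (cid, pvColorMap.getD cid "", pvColorLabels.getD cid "")))
    (fun x => x.1) false
  if items = [] then ""
  else
    let rows := String.join (items.map (fun t => pvRow t.2.1 t.2.2))
    pvHeader ++ rows ++ "</div>"

-- ===== PORT B =====
-- _ROWS: rows rendered once at module load, keyed by colour id.
def pvRowsD : PySem.Dict Int String :=
  PySem.Dict.ofList (pvColorLabels.items.map
    (fun p => (p.1, pvRow (pvColorMap.getD p.1 "") p.2)))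

-- 'mask |= 1 << c' under the guard '1 <= c <= 7'; 'mask >> i & 1' is Nat.testBit.
def build_legend_html_alt (active_colors : List Int) : String :=
  let mask := active_colors.foldl
    (fun (m : Nat) (c : Int) => if 1 ≤ c ∧ c ≤ 7 then m ||| (1 <<< c.toNat) else m) (0 : Nat)
  if mask = 0 then ""
  else
    let body := String.join
      ((([1, 2, 3, 4, 5, 6, 7] : List Int).filter (fun i => mask.testBit i.toNat)).map
        (fun i => pvRowsD.getD i ""))
    pvHeader ++ body ++ "</div>"

-- ===== PRECONDITION & SPEC =====
-- The Python argument is a set[int]; under the type convention it is a List Int of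
-- DISTINCT elements, so Pre_ states exactly that representation invariant.
def Pre_build_legend_html (active_colors : List Int) : Prop := active_colors.Nodup
instance (active_colors : List Int) : Decidable (Pre_build_legend_html active_colors) := by
  unfold Pre_build_legend_html; infer_instance

def pvWitness_build_legend_html : List Int := [3, 1, 9]

def Spec_build_legend_html (active_colors : List Int) (out : String) : Prop := out = build_legend_html_alt active_colors
instance (active_colors : List Int) (out : String) : Decidable (Spec_build_legend_html active_colors out) := by unfold Spec_build_legend_html; infer_instance

-- ===== CLAIM (what is proved, stated in full; the proofs are below) =====
def Claim_equal_build_legend_html : Prop := ∀ (active_colors : List Int), Dom_build_legend_html active_colors → Pre_build_legend_html active_colors → Spec_build_legend_html active_colors (build_legend_html active_colors)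

-- ===== LEMMAS AND PROOFS =====

-- the triple A builds for an admitted colour id
def pvTriple (cid : Int) : Int × String × String :=
  (cid, pvColorMap.getD cid "", pvColorLabels.getD cid "")

-- B's mask-accumulating step
def pvStep (m : Nat) (c : Int) : Nat :=
  if 1 ≤ c ∧ c ≤ 7 then m ||| (1 <<< c.toNat) else m

lemma pvLabels_contains (x : Int) :
    pvColorLabels.contains x = decide (x ∈ ([1, 2, 3, 4, 5, 6, 7] : List Int)) := by
  rw [PySem.Dict.contains_eq_decide_mem_keys]
  have : pvColorLabels.keys = [1, 2, 3, 4, 5, 6, 7] := by decide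
  rw [this]

-- bit i of the accumulated mask records membership of i in the scanned list, for 1 ≤ i ≤ 7
lemma pvFold_testBit (l : List Int) : ∀ (m : Nat) (i : Nat), 1 ≤ i → i ≤ 7 →
    (l.foldl pvStep m).testBit i = (m.testBit i || decide ((i : Int) ∈ l)) := by
  induction l with
  | nil => intro m i _ _; simp
  | cons c tl ih =>
    intro m i h1 h7
    simp only [List.foldl_cons, ih (pvStep m c) i h1 h7, List.mem_cons]
    unfold pvStep
    by_cases hc : 1 ≤ c ∧ c ≤ 7
    · rw [if_pos hc]
      have h2 : (1 : Nat) <<< c.toNat = 2 ^ c.toNat := Nat.one_shiftLeft c.toNat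
      rw [h2, Nat.testBit_or, Nat.testBit_two_pow]
      have : (c.toNat = i) ↔ ((i : Int) = c) := by omega
      by_cases hq : (i : Int) = c <;> simp [hq, this]
    · rw [if_neg hc]
      have : ¬ ((i : Int) = c) := by omega
      simp [this]

-- if nothing in the list passes the guard the mask stays put
lemma pvFold_id (l : List Int) : ∀ m, (∀ c ∈ l, ¬(1 ≤ c ∧ c ≤ 7)) → l.foldl pvStep m = m := by
  induction l with
  | nil => intro m _; rfl
  | cons c tl ih =>
    intro m h
    simp only [List.foldl_cons]
    rw [show pvStep m c = m from if_neg (h c (List.mem_cons_self))]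
    exact ih m (fun x hx => h x (List.mem_cons_of_mem c hx))

-- A's sorted item list equals the ordered 1..7 scan
lemma pvItems_eq (active : List Int) (h : active.Nodup) :
    PySem.List.sorted
      ((active.filter (fun cid => pvColorLabels.contains cid)).map pvTriple)
      (fun x => x.1) false
    = (([1, 2, 3, 4, 5, 6, 7] : List Int).filter (fun k => decide (k ∈ active))).map pvTriple := by
  apply PySem.List.sorted_eq_of_perm_of_pairwise_lt
  · refine List.Perm.map pvTriple ?_
    refine (List.perm_ext_iff_of_nodup ?_ ?_).mpr ?_
    · exact List.Nodup.filter _ (by decide)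
    · exact List.Nodup.filter _ h
    · intro a
      simp [List.mem_filter, pvLabels_contains]
      tauto
  · rw [List.pairwise_map]
    refine List.Pairwise.filter _ ?_
    show ([1, 2, 3, 4, 5, 6, 7] : List Int).Pairwise (fun a b => (pvTriple a).1 < (pvTriple b).1)
    simp only [pvTriple]
    decide

-- B's bit filter over 1..7 equals the membership filter
lemma pvFilter_eq (active : List Int) :
    (([1, 2, 3, 4, 5, 6, 7] : List Int).filter
        (fun i => (active.foldl pvStep 0).testBit i.toNat))
    = ([1, 2, 3, 4, 5, 6, 7] : List Int).filter (fun k => decide (k ∈ active)) := by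
  apply List.filter_congr
  intro i hi
  have h1 : 1 ≤ i.toNat ∧ i.toNat ≤ 7 ∧ ((i.toNat : Int) = i) := by
    fin_cases hi <;> simp
  rw [pvFold_testBit active 0 i.toNat h1.1 h1.2.1, h1.2.2]
  simp

-- the mask is zero exactly when the membership filter is empty
lemma pvMask_zero_iff (active : List Int) :
    active.foldl pvStep 0 = 0
    ↔ ([1, 2, 3, 4, 5, 6, 7] : List Int).filter (fun k => decide (k ∈ active)) = [] := by
  constructor
  · intro hm
    rw [← pvFilter_eq active, hm]
    simp
  · intro hf
    have hmem : ∀ k ∈ ([1, 2, 3, 4, 5, 6, 7] : List Int), ¬ (k ∈ active) := by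
      intro k hk hka
      have := List.filter_eq_nil_iff.mp hf k hk
      simp at this; exact this hka
    apply pvFold_id
    intro c hc hbound
    obtain ⟨hb1, hb2⟩ := hbound
    have : c ∈ ([1, 2, 3, 4, 5, 6, 7] : List Int) := by
      interval_cases c <;> simp
    exact hmem c this hc

-- each precomputed row equals the row A formats for that id
lemma pvRows_eq : ∀ i ∈ ([1, 2, 3, 4, 5, 6, 7] : List Int),
    pvRowsD.getD i "" = pvRow (pvColorMap.getD i "") (pvColorLabels.getD i "") := by
  set_option maxRecDepth 4000 in decide

-- ===== VERDICT (by name: the statement is the Claim_ definition above) =====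
theorem build_legend_html_spec : Claim_equal_build_legend_html := by
  intro active _ hpre
  unfold Spec_build_legend_html build_legend_html build_legend_html_alt
  rw [show (fun cid : Int => (cid, pvColorMap.getD cid "", pvColorLabels.getD cid "")) = pvTriple from rfl]
  rw [show (fun (m : Nat) (c : Int) => if 1 ≤ c ∧ c ≤ 7 then m ||| (1 <<< c.toNat) else m) = pvStep from rfl]
  rw [pvItems_eq active hpre]
  dsimp only
  rw [pvFilter_eq active]
  simp only [List.map_eq_nil_iff]
  by_cases he : ([1, 2, 3, 4, 5, 6, 7] : List Int).filter (fun k => decide (k ∈ active)) = []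
  · rw [if_pos he, if_pos ((pvMask_zero_iff active).mpr he)]
  · rw [if_neg he, if_neg (fun h => he ((pvMask_zero_iff active).mp h))]
    have hmap : List.map ((fun t : Int × String × String => pvRow t.2.1 t.2.2) ∘ pvTriple)
        (List.filter (fun k => decide (k ∈ active)) [1, 2, 3, 4, 5, 6, 7])
      = List.map (fun i => pvRowsD.getD i "")
        (List.filter (fun k => decide (k ∈ active)) [1, 2, 3, 4, 5, 6, 7]) :=
      List.map_congr_left (fun i hi => by
        have h := pvRows_eq i (List.mem_of_mem_filter hi)
        simp [pvTriple, Function.comp, h])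
    rw [List.map_map, hmap]
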